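-- pv_equiv track=rewrite | github.com/WhiteBear-Fx/REClistMaker | rec_list_generator.py | _create_pattern
-- ===== SOURCE A (Python) =====
-- def _create_pattern(p: int, m: int) -> list[tuple[list[int], int]]:
--     """
--     Generate all possible integer sequence patterns.
--
--     :param p: Maximum sequence length (inclusive).
--     :param m: Divisor condition for filtering valid lengths r.
--     :return: A list of tuples (sequence, num_labels), where
--         sequence is a list of integers of length r, and
--         num_labels is the number of distinct integers in the sequence
--         (i.e., max_label + 1, at least 2).
--         The list is sorted in ascending order of num_labels.
--     """
--     patterns = []
--     for r in range(2, p + 1):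
--         if m % r != 0:
--             continue
--
--         def backtrack(labels: list[int], max_label: int):
--             if len(labels) == r:
--                 if max_label >= 1:
--                     patterns.append((labels[:], max_label + 1))
--                 return
--             for label in range(max_label + 1):
--                 labels.append(label)
--                 backtrack(labels, max_label)
--                 labels.pop()
--             labels.append(max_label + 1)
--             backtrack(labels, max_label + 1)
--             labels.pop()
--
--         backtrack([0], 0)
--
--     patterns.sort(key=lambda x: x[1])
--     return patterns
-- ===== SOURCE B (Python) =====
-- def _create_pattern(p: int, m: int) -> list[tuple[list[int], int]]:
--     """Breadth-first level expansion instead of DFS backtracking: for each valid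
--     length r, grow all restricted-growth prefixes one position at a time, then
--     emit every sequence that uses at least two labels."""
--     patterns = []
--     for r in range(2, p + 1):
--         if m % r != 0:
--             continue
--         level = [([0], 0)]
--         for _ in range(r - 1):
--             level = [(seq + [lab], max(ml, lab))
--                      for (seq, ml) in level
--                      for lab in range(ml + 2)]
--         patterns.extend((seq, ml + 1) for (seq, ml) in level if ml >= 1)
--     patterns.sort(key=lambda x: x[1])
--     return patterns
-- ===== Notes on version B (the rewrite author's own statement) =====
-- stated objective: alternative
-- what changed: Replaces A's recursive DFS backtracking (mutable list + inner closure) with an iterative breadth-first expansion: for each valid length r, all restricted-growth prefixes are grown one position per round by a comprehension, then sequences using at least two labels are emitted; same lexicographic emission order, so the stable sort by label count agrees.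
import Mathlib
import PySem

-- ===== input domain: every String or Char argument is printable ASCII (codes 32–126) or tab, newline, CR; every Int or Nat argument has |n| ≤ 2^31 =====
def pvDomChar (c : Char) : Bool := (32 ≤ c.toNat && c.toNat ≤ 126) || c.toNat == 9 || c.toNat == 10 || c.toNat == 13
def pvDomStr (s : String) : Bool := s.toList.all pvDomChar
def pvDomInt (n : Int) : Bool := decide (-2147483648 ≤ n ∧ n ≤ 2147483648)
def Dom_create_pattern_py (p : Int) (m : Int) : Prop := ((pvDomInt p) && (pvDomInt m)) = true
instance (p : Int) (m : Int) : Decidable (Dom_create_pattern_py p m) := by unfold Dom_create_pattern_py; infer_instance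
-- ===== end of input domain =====

-- B replaces A's DFS backtracking with a breadth-first level-by-level expansion of
-- restricted-growth prefixes (same emission order, so the stable sort agrees); alternative, no speed claim.

-- ===== PORT A =====
-- A's inner `backtrack`: fuel = r - len(labels) (the recursion adds one label per call
-- and stops at len == r); `acc` is the outer mutable `patterns` list.
def pvBack (fuel : Nat) (labels : List Int) (maxl : Int)
    (acc : List (List Int × Int)) : List (List Int × Int) :=
  match fuel with
  | 0 => if 1 ≤ maxl then acc ++ [(labels, maxl + 1)] else acc
  | n + 1 =>
      pvBack n (labels ++ [maxl + 1]) (maxl + 1)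
        ((PySem.List.pyRange 0 (maxl + 1) 1).foldl
          (fun a lab => pvBack n (labels ++ [lab]) maxl a) acc)

def create_pattern_py (p : Int) (m : Int) : List (List Int × Int) :=
  let patterns := (PySem.List.pyRange 2 (p + 1) 1).foldl
    (fun acc r =>
      if PySem.Int.mod m r ≠ 0 then acc
      else pvBack (r - 1).toNat [0] 0 acc) []
  PySem.List.sorted patterns (fun x => x.2) false

-- ===== PORT B =====
-- one step of Source B's comprehension: all one-label extensions of a prefix
def pvChildren (sm : List Int × Int) : List (List Int × Int) :=
  (PySem.List.pyRange 0 (sm.2 + 2) 1).map (fun lab => (sm.1 ++ [lab], max sm.2 lab))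

-- Source B's `for _ in range(r-1): level = [...]`
def pvLevels (n : Nat) (level : List (List Int × Int)) : List (List Int × Int) :=
  match n with
  | 0 => level
  | k + 1 => pvLevels k (level.flatMap pvChildren)

-- Source B's `patterns.extend((seq, ml+1) for (seq, ml) in level if ml >= 1)`
def pvEmit (level : List (List Int × Int)) : List (List Int × Int) :=
  (level.filter (fun sm => 1 ≤ sm.2)).map (fun sm => (sm.1, sm.2 + 1))

def create_pattern_py_alt (p : Int) (m : Int) : List (List Int × Int) :=
  let patterns := (PySem.List.pyRange 2 (p + 1) 1).foldl
    (fun acc r =>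
      if PySem.Int.mod m r ≠ 0 then acc
      else acc ++ pvEmit (pvLevels (r - 1).toNat [([0], 0)])) []
  PySem.List.sorted patterns (fun x => x.2) false

-- ===== PRECONDITION & SPEC =====
def Spec_create_pattern_py (p : Int) (m : Int) (out : List (List Int × Int)) : Prop := out = create_pattern_py_alt p m
instance (p : Int) (m : Int) (out : List (List Int × Int)) : Decidable (Spec_create_pattern_py p m out) := by unfold Spec_create_pattern_py; infer_instance

-- ===== CLAIM (what is proved, stated in full; the proofs are below) =====
def Claim_equal_create_pattern_py : Prop := ∀ (p : Int) (m : Int), Dom_create_pattern_py p m → Spec_create_pattern_py p m (create_pattern_py p m)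

-- ===== LEMMAS AND PROOFS =====

lemma pvLevels_append (n : Nat) (xs ys : List (List Int × Int)) :
    pvLevels n (xs ++ ys) = pvLevels n xs ++ pvLevels n ys := by
  induction n generalizing xs ys with
  | zero => simp [pvLevels]
  | succ k ih => simp [pvLevels, List.flatMap_append, ih]

lemma pvLevels_nil (n : Nat) : pvLevels n [] = [] := by
  induction n with
  | zero => rfl
  | succ k ih => simpa [pvLevels] using ih

lemma pvLevels_flatMap (n : Nat) (xs : List (List Int × Int)) :
    pvLevels n xs = xs.flatMap (fun x => pvLevels n [x]) := by
  induction xs with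
  | nil => simp [pvLevels_nil]
  | cons x t ih =>
      have : x :: t = [x] ++ t := rfl
      rw [this, pvLevels_append, ih]; simp

lemma pvEmit_append (xs ys : List (List Int × Int)) :
    pvEmit (xs ++ ys) = pvEmit xs ++ pvEmit ys := by
  simp [pvEmit]

-- the key invariant: A's backtracking from a prefix produces exactly B's emitted level
lemma pvBack_eq (n : Nat) :
    ∀ (labels : List Int) (maxl : Int), 0 ≤ maxl → ∀ acc,
      pvBack n labels maxl acc = acc ++ pvEmit (pvLevels n [(labels, maxl)]) := by
  induction n with
  | zero =>
      intro labels maxl _ acc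
      by_cases h : 1 ≤ maxl <;> simp [pvBack, pvLevels, pvEmit, h]
  | succ n ih =>
      intro labels maxl hm acc
      have hfold : ∀ (L : List Int) (a : List (List Int × Int)),
          L.foldl (fun a lab => pvBack n (labels ++ [lab]) maxl a) a
            = a ++ L.flatMap (fun lab => pvEmit (pvLevels n [(labels ++ [lab], maxl)])) := by
        intro L
        induction L with
        | nil => simp
        | cons x t iht =>
            intro a
            simp only [List.foldl_cons, List.flatMap_cons]
            rw [ih (labels ++ [x]) maxl hm a, iht, List.append_assoc]
      -- children of (labels, maxl): labels 0..maxl keep maxl, then maxl+1 raises it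
      have hchild : pvChildren (labels, maxl)
          = (PySem.List.pyRange 0 (maxl + 1) 1).map (fun lab => (labels ++ [lab], maxl))
            ++ [(labels ++ [maxl + 1], maxl + 1)] := by
        simp only [pvChildren]
        rw [(show maxl + 2 = (maxl + 1) + 1 by ring),
          PySem.List.pyRange_one_succ_right (by omega : (0:Int) ≤ maxl + 1), List.map_append]
        congr 1
        · apply List.map_congr_left
          intro lab hlab
          have hb := (PySem.List.mem_pyRange_one).1 hlab
          have hmx : max maxl lab = maxl := by omega
          simp [hmx]
        · simp
      show pvBack n (labels ++ [maxl + 1]) (maxl + 1) _ = _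
      rw [ih (labels ++ [maxl + 1]) (maxl + 1) (by omega), hfold]
      show _ = acc ++ pvEmit (pvLevels n ([(labels, maxl)].flatMap pvChildren))
      rw [List.flatMap_singleton, hchild, pvLevels_append, pvEmit_append,
        pvLevels_flatMap n ((PySem.List.pyRange 0 (maxl + 1) 1).map _),
        List.flatMap_map]
      have hemit : pvEmit (((PySem.List.pyRange 0 (maxl + 1) 1)).flatMap
            (fun lab => pvLevels n [(labels ++ [lab], maxl)]))
          = (PySem.List.pyRange 0 (maxl + 1) 1).flatMap
            (fun lab => pvEmit (pvLevels n [(labels ++ [lab], maxl)])) := by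
        generalize PySem.List.pyRange 0 (maxl + 1) 1 = L
        induction L with
        | nil => simp [pvEmit]
        | cons x t iht => simp only [List.flatMap_cons, pvEmit_append, iht]
      rw [hemit, List.append_assoc]

-- ===== VERDICT (by name: the statement is the Claim_ definition above) =====
theorem create_pattern_py_spec : Claim_equal_create_pattern_py := by
  intro p m _
  show create_pattern_py p m = create_pattern_py_alt p m
  unfold create_pattern_py create_pattern_py_alt
  have hf : (fun (acc : List (List Int × Int)) (r : Int) =>
        if PySem.Int.mod m r ≠ 0 then acc else pvBack (r - 1).toNat [0] 0 acc)
      = (fun acc r =>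
        if PySem.Int.mod m r ≠ 0 then acc
        else acc ++ pvEmit (pvLevels (r - 1).toNat [([0], 0)])) := by
    funext acc r
    by_cases h : PySem.Int.mod m r ≠ 0
    · simp [h]
    · simp only [h, ite_false]
      exact pvBack_eq (r - 1).toNat [0] 0 (by omega) acc
  rw [hf]
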